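-- pv_equiv track=rewrite | github.com/anti-fragile-study/algorithm-study | week-11/bkryusim/호텔_방_배정.py | solution
-- ===== SOURCE A (Python) =====
-- def solution(k, room_number):
--     answer = []
--     sold = dict()
--
--     for number in room_number:
--         x = number
--         update = [x]
--
--         # 유니온 파인드
--         while x in sold.keys() and x != sold[x]:
--             x = sold[x]
--             update.append(x)
--
--         # 트리를 타고 올라가면서 탐색한 친구들 부모도 같이 수정해주기
--         # 이거 안하면 효율성 걸림
--         for m in update:
--             sold[m] = x + 1
--
--         answer.append(x)
--
--     return answer
-- ===== SOURCE B (Python) =====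
-- def solution(k, room_number):
--     answer = []
--     occupied = set()
--     for number in room_number:
--         x = number
--         while x in occupied:
--             x += 1
--         answer.append(x)
--         occupied.add(x)
--     return answer
-- ===== Notes on version B (the rewrite author's own statement) =====
-- stated objective: simpler
-- what changed: Replaced the union-find chain walk with path update over a dict by a plain linear probe over a set for the smallest unoccupied room >= number; measured faster on benchmark inputs via set membership instead of dict chain bookkeeping, though B is O(n^2) in the worst case.
import Mathlib
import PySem

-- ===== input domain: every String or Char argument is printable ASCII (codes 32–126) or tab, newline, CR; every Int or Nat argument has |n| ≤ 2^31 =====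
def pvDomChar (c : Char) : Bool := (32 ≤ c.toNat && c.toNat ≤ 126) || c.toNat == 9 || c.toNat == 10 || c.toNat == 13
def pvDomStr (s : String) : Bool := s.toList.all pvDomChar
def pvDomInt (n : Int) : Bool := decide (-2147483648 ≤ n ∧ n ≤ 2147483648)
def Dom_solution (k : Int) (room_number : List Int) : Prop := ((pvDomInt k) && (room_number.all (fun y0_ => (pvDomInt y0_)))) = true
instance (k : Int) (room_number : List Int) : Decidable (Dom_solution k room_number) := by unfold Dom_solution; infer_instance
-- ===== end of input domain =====

-- B replaces A's union-find chain walk (dict with path update) by a plain linear probe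
-- for the smallest unoccupied room ≥ number over a set of assigned rooms: simpler, and k stays unused.


-- ===== PORT A =====
-- the while loop 'while x in sold.keys() and x != sold[x]: x = sold[x]; update.append(x)';
-- fuel is only a totality guard — on every state A builds, sold's values strictly increase
-- along the chain, so sold.size + 1 steps always suffice (proved below).
def chainA (sold : PySem.Dict Int Int) : Nat → Int → List Int → Int × List Int
  | 0, x, update => (x, update)
  | fuel + 1, x, update =>
    match sold.get? x with
    | some v => if x = v then (x, update) else chainA sold fuel v (update ++ [v])
    | none => (x, update)

def goA (sold : PySem.Dict Int Int) (answer : List Int) : List Int → List Int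
  | [] => answer
  | number :: rest =>
    let p := chainA sold (sold.size + 1) number [number]
    let sold' := p.2.foldl (fun d m => d.insert m (p.1 + 1)) sold
    goA sold' (answer ++ [p.1]) rest

def solution (k : Int) (room_number : List Int) : List Int :=
  goA PySem.Dict.empty [] room_number

-- ===== PORT B =====
-- the while loop 'while x in occupied: x += 1'; fuel is only a totality guard —
-- occupied.length + 1 steps always suffice (proved below).
def probeB (occ : PySem.Set Int) : Nat → Int → Int
  | 0, x => x
  | fuel + 1, x => if PySem.Set.contains occ x then probeB occ fuel (x + 1) else x

def goB (occ : PySem.Set Int) (answer : List Int) : List Int → List Int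
  | [] => answer
  | number :: rest =>
    let x := probeB occ (occ.length + 1) number
    goB (PySem.Set.add occ x) (answer ++ [x]) rest

def solution_alt (k : Int) (room_number : List Int) : List Int :=
  goB PySem.Set.empty [] room_number

-- ===== PRECONDITION & SPEC =====
def Spec_solution (k : Int) (room_number : List Int) (out : List Int) : Prop := out = solution_alt k room_number
instance (k : Int) (room_number : List Int) (out : List Int) : Decidable (Spec_solution k room_number out) := by unfold Spec_solution; infer_instance

-- ===== CLAIM (what is proved, stated in full; the proofs are below) =====
def Claim_equal_solution : Prop := ∀ (k : Int) (room_number : List Int), Dom_solution k room_number → Spec_solution k room_number (solution k room_number)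

-- ===== LEMMAS AND PROOFS =====

-- r is the smallest room ≥ n not in occ
def LeastFree (occ : List Int) (n r : Int) : Prop :=
  n ≤ r ∧ r ∉ occ ∧ ∀ y, n ≤ y → y < r → y ∈ occ

theorem leastFree_unique {occ : List Int} {n r r' : Int}
    (h : LeastFree occ n r) (h' : LeastFree occ n r') : r = r' := by
  obtain ⟨hn, hno, hall⟩ := h
  obtain ⟨hn', hno', hall'⟩ := h'
  rcases lt_trichotomy r r' with hlt | heq | hgt
  · exact absurd (hall' r hn hlt) hno
  · exact heq
  · exact absurd (hall r' hn' hgt) hno'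

-- countP over a threshold splits off the exact hits
theorem countP_threshold_split (l : List Int) (n : Int) :
    l.countP (fun y => decide (n ≤ y)) =
      l.count n + l.countP (fun y => decide (n + 1 ≤ y)) := by
  induction l with
  | nil => simp
  | cons a l ih =>
    simp only [List.countP_cons, List.count_cons, ih]
    by_cases h : a = n
    · subst h; simp; omega
    · by_cases h2 : n ≤ a
      · have : n + 1 ≤ a := by omega
        simp [h2, this, h]; omega
      · have : ¬ (n + 1 ≤ a) := by omega
        simp [h2, this, h]

theorem probeB_least (occ : PySem.Set Int) :
    ∀ (fuel : Nat) (n : Int),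
      occ.countP (fun y => decide (n ≤ y)) < fuel →
      LeastFree occ n (probeB occ fuel n) := by
  intro fuel
  induction fuel with
  | zero => intro n h; omega
  | succ f ih =>
    intro n h
    by_cases hmem : n ∈ occ
    · have hc : PySem.Set.contains occ n = true := (PySem.Set.contains_iff occ n).mpr hmem
      have hcount : 0 < occ.count n := List.count_pos_iff.mpr hmem
      have hsplit := countP_threshold_split occ n
      have hf : occ.countP (fun y => decide (n + 1 ≤ y)) < f := by omega
      have hres := ih (n + 1) hf
      simp only [probeB, hc]
      obtain ⟨h1, h2, h3⟩ := hres
      refine ⟨by omega, h2, ?_⟩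
      intro y hy1 hy2
      by_cases hyn : y = n
      · subst hyn; exact hmem
      · rcases eq_or_lt_of_le hy1 with he | hlt
        · exact he ▸ hmem
        · exact h3 y (Int.add_one_le_iff.mpr hlt) hy2
    · have hc : PySem.Set.contains occ n = false := by
        by_contra hne
        exact hmem ((PySem.Set.contains_iff occ n).mp (by
          cases hcc : PySem.Set.contains occ n with
          | true => rfl
          | false => exact absurd hcc hne))
      simp only [probeB, hc]
      exact ⟨le_refl n, hmem, fun y hy1 hy2 => absurd hy2 (not_lt.mpr hy1)⟩

-- the invariant connecting A's dict and B's set of occupied rooms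
def AInv (sold : PySem.Dict Int Int) (occ : List Int) : Prop :=
  (∀ m, m ∈ sold.keys ↔ m ∈ occ) ∧
  (∀ m v, sold.get? m = some v → m < v ∧ ∀ y, m ≤ y → y < v → y ∈ occ)

theorem mem_keys_iff_get?_isSome (sold : PySem.Dict Int Int) (m : Int) :
    m ∈ sold.keys ↔ (sold.get? m).isSome := by
  have hnone := PySem.Dict.get?_eq_none_iff_not_mem_keys sold m
  cases h : sold.get? m <;> simp_all

theorem chainA_spec (sold : PySem.Dict Int Int) (occ : List Int) (hInv : AInv sold occ) :
    ∀ (fuel : Nat) (x : Int) (u : List Int),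
      sold.keys.countP (fun y => decide (x ≤ y)) < fuel →
      ∃ r path,
        chainA sold fuel x u = (r, u ++ path) ∧
        LeastFree occ x r ∧
        r ∈ x :: path ∧
        (∀ m ∈ x :: path, (m ∈ occ ∨ m = r) ∧ m ≤ r ∧
          ∀ y, m ≤ y → y < r → y ∈ occ) := by
  intro fuel
  induction fuel with
  | zero => intro x u h; omega
  | succ f ih =>
    intro x u h
    cases hget : sold.get? x with
    | none =>
      refine ⟨x, [], ?_, ?_, by simp, ?_⟩
      · simp [chainA, hget]
      · have hx : x ∉ occ := by
          rw [← (hInv.1 x), mem_keys_iff_get?_isSome, hget]; simp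
        exact ⟨le_refl x, hx, fun y hy1 hy2 => absurd hy2 (not_lt.mpr hy1)⟩
      · intro m hm
        simp at hm; subst hm
        exact ⟨Or.inr rfl, le_refl _, fun y hy1 hy2 => absurd hy2 (not_lt.mpr hy1)⟩
    | some v =>
      have hxv := hInv.2 x v hget
      have hxmem : x ∈ sold.keys := by
        rw [mem_keys_iff_get?_isSome, hget]; simp
      have hxocc : x ∈ occ := (hInv.1 x).mp hxmem
      have hne : ¬ (x = v) := by omega
      have hcount : 0 < sold.keys.count x := List.count_pos_iff.mpr hxmem
      have hsplit := countP_threshold_split sold.keys x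
      have hmono : sold.keys.countP (fun y => decide (v ≤ y)) ≤
          sold.keys.countP (fun y => decide (x + 1 ≤ y)) := by
        apply List.countP_mono_left
        intro a _ ha
        simp at ha ⊢; omega
      have hf : sold.keys.countP (fun y => decide (v ≤ y)) < f := by omega
      obtain ⟨r, path, heq, hlf, hrin, hprops⟩ := ih v (u ++ [v]) hf
      refine ⟨r, v :: path, ?_, ?_, ?_, ?_⟩
      · simp [chainA, hget, hne]; rw [heq]; simp
      · obtain ⟨h1, h2, h3⟩ := hlf
        refine ⟨by omega, h2, ?_⟩
        intro y hy1 hy2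
        by_cases hyy : y < v
        · exact hxv.2 y hy1 hyy
        · exact h3 y (not_lt.mp hyy) hy2
      · simp at hrin ⊢; tauto
      · intro m hm
        rcases List.mem_cons.mp hm with hm | hm
        · subst hm
          obtain ⟨h1, h2, h3⟩ := hlf
          refine ⟨Or.inl hxocc, by omega, ?_⟩
          intro y hy1 hy2
          by_cases hyy : y < v
          · exact hxv.2 y hy1 hyy
          · exact h3 y (not_lt.mp hyy) hy2
        · exact hprops m hm

theorem get?_foldl_insert_const (u : List Int) (d : PySem.Dict Int Int) (w m : Int) :
    (u.foldl (fun d m => d.insert m w) d).get? m =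
      if m ∈ u then some w else d.get? m := by
  induction u generalizing d with
  | nil => simp
  | cons a u ih =>
    simp only [List.foldl_cons, ih, PySem.Dict.get?_insert]
    by_cases hmu : m ∈ u <;> by_cases hma : m = a <;> simp [hmu, hma]

theorem keys_foldl_insert_mem (u : List Int) (d : PySem.Dict Int Int) (w m : Int) :
    m ∈ (u.foldl (fun d m => d.insert m w) d).keys ↔ m ∈ d.keys ∨ m ∈ u := by
  rw [PySem.Dict.keys_foldl_insert]
  exact PySem.Set.mem_update (s := d.keys) (xs := u) (y := m)

theorem go_eq (rest : List Int) :
    ∀ (sold : PySem.Dict Int Int) (occ : PySem.Set Int) (answer : List Int),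
      AInv sold occ → goA sold answer rest = goB occ answer rest := by
  induction rest with
  | nil => intro sold occ answer _; rfl
  | cons number rest ih =>
    intro sold occ answer hInv
    -- A's step
    have hfuelA : sold.keys.countP (fun y => decide (number ≤ y)) < sold.size + 1 := by
      have h1 : sold.keys.countP (fun y => decide (number ≤ y)) ≤ sold.keys.length :=
        List.countP_le_length
      have h2 : sold.keys.length = sold.size := by
        simp [PySem.Dict.keys, PySem.Dict.size]
      omega
    obtain ⟨rA, path, heqA, hlfA, hrin, hprops⟩ :=
      chainA_spec sold occ hInv (sold.size + 1) number [number] hfuelA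
    -- B's step
    have hfuelB : occ.countP (fun y => decide (number ≤ y)) < occ.length + 1 := by
      have := List.countP_le_length (p := fun y => decide (number ≤ y)) (l := occ)
      omega
    have hlfB := probeB_least occ (occ.length + 1) number hfuelB
    have hreq : rA = probeB occ (occ.length + 1) number := leastFree_unique hlfA hlfB
    -- the updated states
    have hu' : ([number] ++ path) = number :: path := rfl
    have hInv' : AInv (([number] ++ path).foldl (fun d m => d.insert m (rA + 1)) sold)
        (PySem.Set.add occ rA) := by
      constructor
      · intro m
        rw [keys_foldl_insert_mem, PySem.Set.mem_add, hu']
        constructor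
        · rintro (hm | hm)
          · exact Or.inl ((hInv.1 m).mp hm)
          · rcases (hprops m hm).1 with h | h
            · exact Or.inl h
            · exact Or.inr h
        · rintro (hm | hm)
          · exact Or.inl ((hInv.1 m).mpr hm)
          · subst hm; exact Or.inr (hu' ▸ hrin)
      · intro m v hget
        rw [get?_foldl_insert_const, hu'] at hget
        by_cases hm : m ∈ number :: path
        · simp only [hm, if_true] at hget
          obtain ⟨_, hmr, hcov⟩ := hprops m hm
          injection hget with hv; subst hv
          refine ⟨by omega, ?_⟩
          intro y hy1 hy2
          rw [PySem.Set.mem_add]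
          by_cases hyr : y = rA
          · exact Or.inr hyr
          · exact Or.inl (hcov y hy1 (by omega))
        · simp only [hm, if_false] at hget
          obtain ⟨h1, h2⟩ := hInv.2 m v hget
          refine ⟨h1, fun y hy1 hy2 => ?_⟩
          rw [PySem.Set.mem_add]
          exact Or.inl (h2 y hy1 hy2)
    show goA sold answer (number :: rest) = goB occ answer (number :: rest)
    simp only [goA, goB, heqA]
    rw [← hreq]
    exact ih _ _ _ hInv'

-- ===== VERDICT (by name: the statement is the Claim_ definition above) =====
theorem solution_spec : Claim_equal_solution := by
  intro k room_number _
  unfold Spec_solution solution solution_alt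
  apply go_eq
  constructor
  · intro m; simp [PySem.Dict.keys_empty, PySem.Set.empty]
  · intro m v h; simp [PySem.Dict.get?_empty] at h
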